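-- pv_equiv track=rewrite | github.com/DeanHe/Practice | LeetCodePython/SubsequenceSumAfterCappingElements.py | subsequenceSumAfterCapping
-- ===== SOURCE A (Python) =====
-- from typing import List
--
-- def subsequenceSumAfterCapping(nums: List[int], k: int) -> List[bool]:
--     n = len(nums)
--     res = [False] * n
--
--     # Sort nums so we can easily find how many elements are greater than x in O(1)
--     nums.sort()
--
--     dp = [False] * (k + 1)
--     dp[0] = True
--     idx = 0
--
--     # Traverse each x
--     for i in range(1, n + 1):
--         while idx < n and nums[idx] < i:
--             # Similar to knapsack with space optimization
--             for j in range(k, nums[idx] - 1, -1):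
--                 dp[j] |= dp[j - nums[idx]]
--             idx += 1
--         # Number of elements which are greater than i
--         cnt = n - idx
--
--         # Multiple knapsacks
--         for j in range(cnt + 1):
--             # Pick j knapsacks (each has weight of i)
--             weight = i * j
--             if k < weight:
--                 break
--             # We can form dp[k - weight], so we can form dp[k]
--             # by choosing j knapsacks (each has weight of i)
--             if dp[k - weight]:
--                 res[i - 1] = True
--                 break
--     return res
--
--
--
--     return res
-- ===== SOURCE B (Python) =====
-- from typing import List
--
-- def subsequenceSumAfterCapping(nums: List[int], k: int) -> List[bool]:
--     # Same in-place sort side effect as the original.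
--     nums.sort()
--     n = len(nums)
--     res = []
--     for i in range(1, n + 1):
--         # Fresh 0/1 subset-sum DP over the capped values min(x, i).
--         dp = [False] * (k + 1)
--         dp[0] = True
--         for x in nums:
--             w = min(x, i)
--             for j in range(k, w - 1, -1):
--                 dp[j] |= dp[j - w]
--         res.append(dp[k])
--     return res
-- ===== Notes on version B (the rewrite author's own statement) =====
-- stated objective: simpler
-- what changed: Replaces the incremental idx/while machinery and the multiple-knapsack break loop with an independent, from-scratch 0/1 subset-sum DP over the capped values min(x, i) for each cap i, appending dp[k] per cap.
import Mathlib
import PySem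

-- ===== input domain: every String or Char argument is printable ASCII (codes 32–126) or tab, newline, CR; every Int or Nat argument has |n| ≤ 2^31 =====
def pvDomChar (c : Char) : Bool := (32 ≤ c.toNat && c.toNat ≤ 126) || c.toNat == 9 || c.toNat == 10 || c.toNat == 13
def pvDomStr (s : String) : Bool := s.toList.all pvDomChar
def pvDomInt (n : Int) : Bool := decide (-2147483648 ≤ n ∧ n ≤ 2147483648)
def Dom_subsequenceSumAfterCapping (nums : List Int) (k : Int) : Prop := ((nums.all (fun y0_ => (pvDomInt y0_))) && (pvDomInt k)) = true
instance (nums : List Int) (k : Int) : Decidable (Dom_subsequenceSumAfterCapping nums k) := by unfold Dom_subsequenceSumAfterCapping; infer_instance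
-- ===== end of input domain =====

-- B replaces A's incremental idx/while machinery and multiple-knapsack break loop with a fresh 0/1
-- subset-sum DP over the capped values min(x, i) for each cap i (simpler, not faster). Both Pythons
-- sort nums in place; the equivalence proved here is about the RETURN value (B performs the same mutation).

-- ===== PORT A =====
-- dp subscript helpers shared by both ports: Python list read dp[j] / write dp[j] = v.
-- Exact for 0 ≤ j < len(dp): under Pre_ every dp subscript both ports perform lies in [0, k].
def pvGetI (a : Array Bool) (i : Int) : Bool := if h : i.toNat < a.size then a[i.toNat] else false
def pvSetI (a : Array Bool) (i : Int) (v : Bool) : Array Bool := a.setIfInBounds i.toNat v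

-- inner knapsack pass: for j in range(k, nums[idx]-1, -1): dp[j] |= dp[j - nums[idx]]
def pvInnerArrA (k w : Int) (dp : Array Bool) : Array Bool :=
  (PySem.List.pyRange k (w - 1) (-1)).foldl
    (fun d j => pvSetI d j (pvGetI d j || pvGetI d (j - w))) dp

-- while idx < n and nums[idx] < i: inner pass with nums[idx]; idx += 1
def pvWhileArrA (s : List Int) (k i : Int) (dp : Array Bool) (idx : Nat) : Array Bool × Nat :=
  if h : idx < s.length then
    if PySem.List.pyGetD s (idx : Int) 0 < i then
      pvWhileArrA s k i (pvInnerArrA k (PySem.List.pyGetD s (idx : Int) 0) dp) (idx + 1)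
    else (dp, idx)
  else (dp, idx)
termination_by s.length - idx

-- for j in range(cnt+1): weight = i*j; if k < weight: break; if dp[k-weight]: res[i-1]=True; break
def pvMkGoArr (k i : Int) (dp : Array Bool) (cnt j : Nat) : Bool :=
  if j < cnt + 1 then
    if k < i * (j : Int) then false
    else if pvGetI dp (k - i * (j : Int)) then true
    else pvMkGoArr k i dp cnt (j + 1)
  else false
termination_by cnt + 1 - j

def subsequenceSumAfterCapping (nums : List Int) (k : Int) : List Bool :=
  let n := nums.length
  let s := PySem.List.sorted nums (fun x => x) false
  let dp0 := pvSetI (Array.replicate (k + 1).toNat false) 0 true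
  let st := (PySem.List.pyRange 1 ((n : Int) + 1) 1).foldl
    (fun (st : Array Bool × Nat × List Bool) i =>
      let w := pvWhileArrA s k i st.1 st.2.1
      let cnt := s.length - w.2
      let res := if pvMkGoArr k i w.1 cnt 0 then PySem.List.pySetD st.2.2 (i - 1) true else st.2.2
      (w.1, w.2, res))
    (dp0, 0, List.replicate n false)
  st.2.2

-- ===== PORT B =====
-- Source B's inner loop: for j in range(k, w-1, -1): dp[j] |= dp[j - w]
def pvInnerArrB (k w : Int) (dp : Array Bool) : Array Bool :=
  (PySem.List.pyRange k (w - 1) (-1)).foldl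
    (fun d j => pvSetI d j (pvGetI d j || pvGetI d (j - w))) dp

def subsequenceSumAfterCapping_alt (nums : List Int) (k : Int) : List Bool :=
  let s := PySem.List.sorted nums (fun x => x) false
  let n := s.length
  (PySem.List.pyRange 1 ((n : Int) + 1) 1).foldl
    (fun res i =>
      let dp := s.foldl (fun d x => pvInnerArrB k (min x i) d)
        (pvSetI (Array.replicate (k + 1).toNat false) 0 true)
      res ++ [pvGetI dp k]) []

-- ===== PRECONDITION & SPEC =====
-- Pre_ excludes exactly the inputs on which the Python A raises IndexError: k < 0 (dp[0] on a list
-- of length k+1 ≤ 0) and lists with a negative element (the first inner pass reads dp[k - x], an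
-- index > k).  A returns normally on every input satisfying Pre_.
def Pre_subsequenceSumAfterCapping (nums : List Int) (k : Int) : Prop :=
  0 ≤ k ∧ ∀ x ∈ nums, 0 ≤ x
instance (nums : List Int) (k : Int) : Decidable (Pre_subsequenceSumAfterCapping nums k) := by
  unfold Pre_subsequenceSumAfterCapping; infer_instance

def pvWitness_subsequenceSumAfterCapping : List Int × Int := ([2, 3, 1], 3)

def Spec_subsequenceSumAfterCapping (nums : List Int) (k : Int) (out : List Bool) : Prop := out = subsequenceSumAfterCapping_alt nums k
instance (nums : List Int) (k : Int) (out : List Bool) : Decidable (Spec_subsequenceSumAfterCapping nums k out) := by unfold Spec_subsequenceSumAfterCapping; infer_instance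

-- ===== CLAIM (what is proved, stated in full; the proofs are below) =====
def Claim_equal_subsequenceSumAfterCapping : Prop := ∀ (nums : List Int) (k : Int), Dom_subsequenceSumAfterCapping nums k → Pre_subsequenceSumAfterCapping nums k → Spec_subsequenceSumAfterCapping nums k (subsequenceSumAfterCapping nums k)

-- ===== LEMMAS AND PROOFS =====

-- List-level twins of the two ports (proof-internal models; the bridges below prove each
-- Array-based port computes the same values)
-- inner knapsack pass: for j in range(k, nums[idx]-1, -1): dp[j] |= dp[j - nums[idx]]
def pvInnerA (k w : Int) (dp : List Bool) : List Bool :=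
  (PySem.List.pyRange k (w - 1) (-1)).foldl
    (fun d j => PySem.List.pySetD d j (PySem.List.pyGetD d j false || PySem.List.pyGetD d (j - w) false)) dp

-- while idx < n and nums[idx] < i: inner pass with nums[idx]; idx += 1
def pvWhileA (s : List Int) (k i : Int) (dp : List Bool) (idx : Nat) : List Bool × Nat :=
  if h : idx < s.length then
    if PySem.List.pyGetD s (idx : Int) 0 < i then
      pvWhileA s k i (pvInnerA k (PySem.List.pyGetD s (idx : Int) 0) dp) (idx + 1)
    else (dp, idx)
  else (dp, idx)
termination_by s.length - idx

-- for j in range(cnt+1): weight = i*j; if k < weight: break; if dp[k-weight]: res[i-1]=True; break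
def pvMkGo (k i : Int) (dp : List Bool) (cnt j : Nat) : Bool :=
  if j < cnt + 1 then
    if k < i * (j : Int) then false
    else if PySem.List.pyGetD dp (k - i * (j : Int)) false then true
    else pvMkGo k i dp cnt (j + 1)
  else false
termination_by cnt + 1 - j

def pvModelA (nums : List Int) (k : Int) : List Bool :=
  let n := nums.length
  let s := PySem.List.sorted nums (fun x => x) false
  let dp0 := PySem.List.pySetD (List.replicate (k + 1).toNat false) 0 true
  let st := (PySem.List.pyRange 1 ((n : Int) + 1) 1).foldl
    (fun (st : List Bool × Nat × List Bool) i =>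
      let w := pvWhileA s k i st.1 st.2.1
      let cnt := s.length - w.2
      let res := if pvMkGo k i w.1 cnt 0 then PySem.List.pySetD st.2.2 (i - 1) true else st.2.2
      (w.1, w.2, res))
    (dp0, 0, List.replicate n false)
  st.2.2

-- Source B's inner loop: for j in range(k, w-1, -1): dp[j] |= dp[j - w]
def pvInnerB (k w : Int) (dp : List Bool) : List Bool :=
  (PySem.List.pyRange k (w - 1) (-1)).foldl
    (fun d j => PySem.List.pySetD d j (PySem.List.pyGetD d j false || PySem.List.pyGetD d (j - w) false)) dp

def pvModelB (nums : List Int) (k : Int) : List Bool :=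
  let s := PySem.List.sorted nums (fun x => x) false
  let n := s.length
  (PySem.List.pyRange 1 ((n : Int) + 1) 1).foldl
    (fun res i =>
      let dp := s.foldl (fun d x => pvInnerB k (min x i) d)
        (PySem.List.pySetD (List.replicate (k + 1).toNat false) 0 true)
      res ++ [PySem.List.pyGetD dp k false]) []

-- abbreviations used only by the proofs
def pvDp0 (k : Int) : List Bool := PySem.List.pySetD (List.replicate (k + 1).toNat false) 0 true
def pvCLT (s : List Int) (i : Int) : Nat := (s.filter (fun x => decide (x < i))).length
def pvDpAt (s : List Int) (k i : Int) : List Bool :=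
  (s.take (pvCLT s i)).foldl (fun d x => pvInnerA k x d) (pvDp0 k)
def pvValA (s : List Int) (k i : Int) : Bool := pvMkGo k i (pvDpAt s k i) (s.length - pvCLT s i) 0
def pvValB (s : List Int) (k i : Int) : Bool :=
  PySem.List.pyGetD (s.foldl (fun d x => pvInnerB k (min x i) d) (pvDp0 k)) k false

theorem pv_getD_set (l : List Bool) (n j : Nat) (v : Bool) :
    (l.set n v).getD j false = if n = j ∧ n < l.length then v else l.getD j false := by
  rcases Nat.lt_or_ge j l.length with hj | hj
  · rw [List.getD_eq_getElem _ _ (by simpa using hj), List.getElem_set]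
    split_ifs with h1 h2 h3
    · rfl
    · omega
    · omega
    · exact (List.getD_eq_getElem _ _ hj).symm
  · rw [if_neg (by omega), List.getD_eq_default _ _ (by simpa using hj),
      List.getD_eq_default _ _ hj]

theorem pv_getD_map_range {α : Type} (f : Nat → α) (n j : Nat) (d : α) :
    ((List.range n).map f).getD j d = if j < n then f j else d := by
  by_cases h : j < n
  · rw [if_pos h, List.getD_eq_getElem _ _ (by simpa using h)]
    simp
  · rw [if_neg h, List.getD_eq_default _ _ (by simpa using h)]

theorem pv_length_innerA (k w : Int) (dp : List Bool) : (pvInnerA k w dp).length = dp.length := by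
  unfold pvInnerA
  generalize PySem.List.pyRange k (w - 1) (-1) = l
  induction l generalizing dp with
  | nil => rfl
  | cons a t ih => rw [List.foldl_cons, ih, PySem.List.length_pySetD]

theorem pv_length_foldInner (k : Int) (l : List Int) (dp : List Bool) :
    (l.foldl (fun d x => pvInnerA k x d) dp).length = dp.length := by
  induction l generalizing dp with
  | nil => rfl
  | cons a t ih => rw [List.foldl_cons, ih, pv_length_innerA]

theorem pv_length_dp0 (k : Int) (hk : 0 ≤ k) : (pvDp0 k).length = k.toNat + 1 := by
  unfold pvDp0
  rw [PySem.List.length_pySetD, List.length_replicate]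
  omega

theorem pv_pySetD_nonneg (dp : List Bool) (i : Int) (hi : 0 ≤ i) (v : Bool) :
    PySem.List.pySetD dp i v = dp.set i.toNat v := by
  conv_lhs => rw [show i = ((i.toNat : Nat) : Int) from (Int.toNat_of_nonneg hi).symm]
  rw [PySem.List.pySetD_natCast]

theorem pv_pyGetD_nonneg (dp : List Bool) (i : Int) (h : 0 ≤ i) (d : Bool) :
    PySem.List.pyGetD dp i d = dp.getD i.toNat d := by
  conv_lhs => rw [show i = ((i.toNat : Nat) : Int) from (Int.toNat_of_nonneg h).symm]
  rw [PySem.List.pyGetD_natCast]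

theorem pv_desc_nil (w : Int) (_hw : 1 ≤ w) (hi : Int) (dp : List Bool) (hle : hi ≤ w - 1) :
    (PySem.List.pyRange hi (w - 1) (-1)).foldl
      (fun d j => PySem.List.pySetD d j (PySem.List.pyGetD d j false || PySem.List.pyGetD d (j - w) false)) dp
    = (List.range dp.length).map
        (fun (j : Nat) => if (j : Int) ≤ hi then dp.getD j false || (decide (w ≤ (j : Int)) && dp.getD (j - w.toNat) false) else dp.getD j false) := by
  rw [PySem.List.pyRange_neg_one_eq_nil hle, List.foldl_nil]
  apply List.ext_getElem (by simp)
  intro p h1 h2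
  simp only [List.getElem_map, List.getElem_range]
  have hd : dp.getD p false = dp[p] := List.getD_eq_getElem _ _ h1
  split_ifs with hc
  · have hdec : decide (w ≤ (p : Int)) = false := by simp only [decide_eq_false_iff_not]; omega
    rw [hdec, Bool.false_and, Bool.or_false, hd]
  · rw [hd]

theorem pv_desc (w : Int) (hw : 1 ≤ w) :
    ∀ (m : Nat) (hi : Int) (dp : List Bool), hi < (dp.length : Int) → (hi - (w - 1)).toNat ≤ m →
      (PySem.List.pyRange hi (w - 1) (-1)).foldl
        (fun d j => PySem.List.pySetD d j (PySem.List.pyGetD d j false || PySem.List.pyGetD d (j - w) false)) dp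
      = (List.range dp.length).map
          (fun (j : Nat) => if (j : Int) ≤ hi then dp.getD j false || (decide (w ≤ (j : Int)) && dp.getD (j - w.toNat) false) else dp.getD j false) := by
  intro m
  induction m with
  | zero =>
    intro hi dp hlen hm
    exact pv_desc_nil w hw hi dp (by omega)
  | succ m ih =>
    intro hi dp hlen hm
    by_cases hle : hi ≤ w - 1
    · exact pv_desc_nil w hw hi dp hle
    · have hlt : w - 1 < hi := by omega
      have h0hi : 0 ≤ hi := by omega
      rw [PySem.List.pyRange_neg_one_cons hlt, List.foldl_cons]
      have hgv1 : PySem.List.pyGetD dp hi false = dp.getD hi.toNat false := by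
        conv_lhs => rw [show hi = ((hi.toNat : Nat) : Int) from (Int.toNat_of_nonneg h0hi).symm]
        rw [PySem.List.pyGetD_natCast]
      have hgv2 : PySem.List.pyGetD dp (hi - w) false = dp.getD (hi - w).toNat false := by
        conv_lhs => rw [show hi - w = (((hi - w).toNat : Nat) : Int) from (Int.toNat_of_nonneg (by omega)).symm]
        rw [PySem.List.pyGetD_natCast]
      rw [hgv1, hgv2, pv_pySetD_nonneg dp hi h0hi]
      rw [ih (hi - 1) (dp.set hi.toNat (dp.getD hi.toNat false || dp.getD (hi - w).toNat false))
        (by simp only [List.length_set]; omega) (by omega)]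
      apply List.ext_getElem (by simp)
      intro p h1 h2
      simp only [List.getElem_map, List.getElem_range]
      have hNset : hi.toNat < dp.length := by omega
      by_cases hp1 : (p : Int) ≤ hi - 1
      · rw [if_pos hp1, if_pos (by omega : (p : Int) ≤ hi)]
        rw [pv_getD_set, if_neg (by omega), pv_getD_set, if_neg (by omega)]
      · by_cases hp2 : (p : Int) ≤ hi
        · rw [if_neg hp1, if_pos hp2, pv_getD_set, if_pos (by constructor <;> omega)]
          rw [show (hi - w).toNat = p - w.toNat from by omega, show hi.toNat = p from by omega]
          rw [show decide (w ≤ (p : Int)) = true from by simp only [decide_eq_true_eq]; omega, Bool.true_and]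
        · rw [if_neg hp1, if_neg hp2, pv_getD_set, if_neg (by omega)]

theorem pv_innerA_spec (k w : Int) (hw : 1 ≤ w) (dp : List Bool) (hl : (dp.length : Int) = k + 1) :
    pvInnerA k w dp = (List.range dp.length).map
      (fun (j : Nat) => dp.getD j false || (decide (w ≤ (j : Int)) && dp.getD (j - w.toNat) false)) := by
  unfold pvInnerA
  rw [pv_desc w hw (k - (w - 1)).toNat k dp (by omega) le_rfl]
  apply List.ext_getElem (by simp)
  intro p h1 h2
  simp only [List.length_map, List.length_range] at h1 h2
  simp only [List.getElem_map, List.getElem_range]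
  rw [if_pos (by omega : (p : Int) ≤ k)]

theorem pv_cLT_eq_zero (t : List Int) (i : Int) (h : ∀ y ∈ t, ¬ y < i) : pvCLT t i = 0 := by
  unfold pvCLT
  rw [List.filter_eq_nil_iff.mpr (by intro y hy; simpa using h y hy)]
  rfl

theorem pv_sorted_lt_iff : ∀ (s : List Int), s.Pairwise (· ≤ ·) → ∀ (i : Int) (idx : Nat) (h : idx < s.length), (s[idx] < i ↔ idx < pvCLT s i) := by
  intro s
  induction s with
  | nil => intro _ i idx h; simp at h
  | cons a t ih =>
    intro hs i idx h
    rcases List.pairwise_cons.mp hs with ⟨ha, ht⟩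
    have hclt : pvCLT (a :: t) i = (if a < i then 1 else 0) + pvCLT t i := by
      unfold pvCLT
      rw [List.filter_cons]
      by_cases hai : a < i
      · rw [if_pos (by simpa using hai), if_pos hai]
        simp only [List.length_cons]; omega
      · rw [if_neg (by simpa using hai), if_neg hai]
        omega
    cases idx with
    | zero =>
      simp only [List.getElem_cons_zero]
      constructor
      · intro hai; rw [hclt, if_pos hai]; omega
      · intro hpos
        by_contra hai
        rw [hclt, if_neg hai, pv_cLT_eq_zero t i (fun y hy => by have := ha y hy; omega)] at hpos
        omega
    | succ idx =>
      simp only [List.getElem_cons_succ]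
      have h' : idx < t.length := by simpa using h
      rw [hclt, ih ht i idx h']
      by_cases hai : a < i
      · rw [if_pos hai]; omega
      · rw [if_neg hai, pv_cLT_eq_zero t i (fun y hy => by have := ha y hy; omega)]
        omega

theorem pv_cLT_le (s : List Int) (i : Int) : pvCLT s i ≤ s.length := by
  unfold pvCLT
  exact List.length_filter_le _ _

theorem pv_cLT_mono (s : List Int) (i i' : Int) (h : i ≤ i') : pvCLT s i ≤ pvCLT s i' := by
  induction s with
  | nil => simp [pvCLT]
  | cons a t ih =>
    unfold pvCLT at ih ⊢
    rw [List.filter_cons, List.filter_cons]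
    split_ifs with h1 h2
    · simp only [List.length_cons]; omega
    · simp only [decide_eq_true_eq] at h1 h2; omega
    · simp only [List.length_cons]; omega
    · exact ih

theorem pv_while_stop (s : List Int) (hs : s.Pairwise (· ≤ ·)) (k i : Int) (idx : Nat) (dp : List Bool)
    (heq : idx = pvCLT s i) : pvWhileA s k i dp idx = (dp, idx) := by
  rw [pvWhileA.eq_def]
  split_ifs with hlt hguard
  · exfalso
    have hg : PySem.List.pyGetD s (idx : Int) 0 = s[idx] := by
      rw [PySem.List.pyGetD_natCast]
      exact List.getD_eq_getElem _ _ hlt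
    rw [hg] at hguard
    have := (pv_sorted_lt_iff s hs i idx hlt).mp hguard
    omega
  · rfl
  · rfl

theorem pv_while_spec (s : List Int) (hs : s.Pairwise (· ≤ ·)) (k i : Int) :
    ∀ (m idx : Nat) (dp : List Bool), idx ≤ pvCLT s i → pvCLT s i - idx ≤ m →
      pvWhileA s k i dp idx = (((s.take (pvCLT s i)).drop idx).foldl (fun d x => pvInnerA k x d) dp, pvCLT s i) := by
  intro m
  induction m with
  | zero =>
    intro idx dp h1 h2
    have heq : idx = pvCLT s i := by omega
    have hdrop : ((s.take (pvCLT s i)).drop idx) = [] := by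
      apply List.drop_eq_nil_of_le
      rw [List.length_take]; omega
    rw [pv_while_stop s hs k i idx dp heq, hdrop, List.foldl_nil, heq]
  | succ m ih =>
    intro idx dp h1 h2
    by_cases heq : idx = pvCLT s i
    · have hdrop : ((s.take (pvCLT s i)).drop idx) = [] := by
        apply List.drop_eq_nil_of_le
        rw [List.length_take]; omega
      rw [pv_while_stop s hs k i idx dp heq, hdrop, List.foldl_nil, heq]
    · have hcl := pv_cLT_le s i
      have hlt : idx < s.length := by omega
      have hguard : s[idx] < i := (pv_sorted_lt_iff s hs i idx hlt).mpr (by omega)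
      rw [pvWhileA.eq_def, dif_pos hlt]
      have hg : PySem.List.pyGetD s (idx : Int) 0 = s[idx] := by
        rw [PySem.List.pyGetD_natCast]
        exact List.getD_eq_getElem _ _ hlt
      rw [hg, if_pos hguard]
      rw [ih (idx + 1) (pvInnerA k s[idx] dp) (by omega) (by omega)]
      have hidx : idx < (s.take (pvCLT s i)).length := by
        rw [List.length_take]; omega
      have hsplit : (s.take (pvCLT s i)).drop idx = s[idx] :: (s.take (pvCLT s i)).drop (idx + 1) := by
        rw [List.drop_eq_getElem_cons hidx]
        congr 1
        simp [List.getElem_take]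
      rw [hsplit, List.foldl_cons]

theorem pv_capped_decomp (s : List Int) (hs : s.Pairwise (· ≤ ·)) (i : Int) :
    s.map (fun x => min x i) = s.take (pvCLT s i) ++ List.replicate (s.length - pvCLT s i) i := by
  have hcl := pv_cLT_le s i
  apply List.ext_getElem (by simp [List.length_take]; omega)
  intro p h1 h2
  have hps : p < s.length := by simpa using h1
  simp only [List.getElem_map]
  by_cases hp : p < pvCLT s i
  · rw [List.getElem_append_left (by rw [List.length_take]; omega)]
    have hlt : s[p] < i := (pv_sorted_lt_iff s hs i p hps).mpr hp
    simp [List.getElem_take]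
    omega
  · rw [List.getElem_append_right (by rw [List.length_take]; omega)]
    rw [List.getElem_replicate]
    have hge : ¬ s[p] < i := fun hc => hp ((pv_sorted_lt_iff s hs i p hps).mp hc)
    omega

theorem pv_iter_any (k i : Int) (hk : 0 ≤ k) (hi : 1 ≤ i) :
    ∀ (c : Nat) (dp : List Bool), (dp.length : Int) = k + 1 →
      ((List.replicate c i).foldl (fun d x => pvInnerA k x d) dp).getD k.toNat false
        = (List.range (c + 1)).any (fun j => decide (i * (j : Int) ≤ k) && dp.getD (k - i * (j : Int)).toNat false) := by
  intro c
  induction c with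
  | zero =>
    intro dp hl
    rw [List.replicate_zero, List.foldl_nil, List.range_one]
    simp only [List.any_cons, List.any_nil, Bool.or_false]
    rw [show i * ((0 : Nat) : Int) = 0 from by simp, show decide ((0 : Int) ≤ k) = true from by simpa using hk]
    rw [Bool.true_and, Int.sub_zero]
  | succ c ih =>
    intro dp hl
    rw [List.replicate_succ, List.foldl_cons]
    rw [ih (pvInnerA k i dp) (by rw [pv_length_innerA]; exact hl)]
    have hspec := pv_innerA_spec k i hi dp hl
    rw [Bool.eq_iff_iff]
    simp only [List.any_eq_true, List.mem_range, Bool.and_eq_true, decide_eq_true_eq]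
    constructor
    · rintro ⟨j, hj, hle, hget⟩
      have hij : 0 ≤ i * (j : Int) := mul_nonneg (by omega) (Int.natCast_nonneg j)
      rw [hspec, pv_getD_map_range, if_pos (by omega : (k - i * (j : Int)).toNat < dp.length)] at hget
      rcases Bool.or_eq_true_iff.mp hget with hA | hB
      · exact ⟨j, by omega, hle, hA⟩
      · simp only [Bool.and_eq_true, decide_eq_true_eq] at hB
        obtain ⟨hi2, hget2⟩ := hB
        have h1 : i * ((j + 1 : Nat) : Int) = i * (j : Int) + i := by push_cast; ring
        refine ⟨j + 1, by omega, by rw [h1]; omega, ?_⟩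
        rw [h1, show (k - (i * (j : Int) + i)).toNat = (k - i * (j : Int)).toNat - i.toNat from by omega]
        exact hget2
    · rintro ⟨j, hj, hle, hget⟩
      have hij : 0 ≤ i * (j : Int) := mul_nonneg (by omega) (Int.natCast_nonneg j)
      by_cases hjc : j < c + 1
      · refine ⟨j, hjc, hle, ?_⟩
        rw [hspec, pv_getD_map_range, if_pos (by omega : (k - i * (j : Int)).toNat < dp.length)]
        rw [hget, Bool.true_or]
      · have hje : j = c + 1 := by omega
        subst hje
        have h1 : i * ((c + 1 : Nat) : Int) = i * (c : Int) + i := by push_cast; ring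
        have hic : 0 ≤ i * (c : Int) := mul_nonneg (by omega) (Int.natCast_nonneg c)
        have hle' : i * (c : Int) ≤ k := by rw [h1] at hle; omega
        refine ⟨c, by omega, hle', ?_⟩
        rw [hspec, pv_getD_map_range, if_pos (by omega : (k - i * (c : Int)).toNat < dp.length)]
        rw [show decide (i ≤ (((k - i * (c : Int)).toNat : Nat) : Int)) = true from by
          simp only [decide_eq_true_eq]; rw [h1] at hle; omega, Bool.true_and]
        rw [show (k - i * (c : Int)).toNat - i.toNat = (k - i * ((c + 1 : Nat) : Int)).toNat from by rw [h1]; omega]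
        rw [hget, Bool.or_true]

theorem pv_mk_any (k i : Int) (_hk : 0 ≤ k) (hi : 1 ≤ i) (dp : List Bool) (hl : (dp.length : Int) = k + 1) (cnt : Nat) :
    ∀ (m j : Nat), j ≤ cnt + 1 → cnt + 1 - j ≤ m →
      pvMkGo k i dp cnt j = (List.range' j (cnt + 1 - j)).any (fun j' => decide (i * (j' : Int) ≤ k) && dp.getD (k - i * (j' : Int)).toNat false) := by
  intro m
  induction m with
  | zero =>
    intro j h1 h2
    have hje : j = cnt + 1 := by omega
    subst hje
    rw [pvMkGo.eq_def, if_neg (by omega)]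
    simp
  | succ m ih =>
    intro j h1 h2
    by_cases hj : j < cnt + 1
    · rw [pvMkGo.eq_def, if_pos hj]
      rw [show cnt + 1 - j = (cnt - j) + 1 from by omega, List.range'_succ]
      by_cases hbig : k < i * (j : Int)
      · rw [if_pos hbig]
        symm
        rw [List.any_eq_false]
        intro x hx
        have hxj : (j : Int) ≤ (x : Int) := by
          rcases List.mem_cons.mp hx with rfl | hx'
          · omega
          · have := (List.mem_range'_1.mp hx').1; omega
        have hmono : i * (j : Int) ≤ i * (x : Int) := mul_le_mul_of_nonneg_left hxj (by omega)
        simp only [Bool.and_eq_true, decide_eq_true_eq, not_and]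
        intro hle
        exact absurd hle (by omega)
      · rw [if_neg hbig]
        have hnn : 0 ≤ k - i * (j : Int) := by omega
        have hg : PySem.List.pyGetD dp (k - i * (j : Int)) false = dp.getD (k - i * (j : Int)).toNat false := by
          conv_lhs => rw [show k - i * (j : Int) = (((k - i * (j : Int)).toNat : Nat) : Int) from (Int.toNat_of_nonneg hnn).symm]
          rw [PySem.List.pyGetD_natCast]
        rw [hg]
        by_cases hdp : dp.getD (k - i * (j : Int)).toNat false = true
        · rw [if_pos hdp]
          symm
          rw [List.any_cons, hdp, Bool.and_true]
          rw [show decide (i * (j : Int) ≤ k) = true from by simp only [decide_eq_true_eq]; omega]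
          simp
        · rw [if_neg hdp]
          rw [ih (j + 1) (by omega) (by omega)]
          rw [show cnt + 1 - (j + 1) = cnt - j from by omega]
          rw [List.any_cons]
          rw [Bool.not_eq_true] at hdp
          rw [hdp, Bool.and_false, Bool.false_or]
    · rw [pvMkGo.eq_def, if_neg hj]
      rw [show cnt + 1 - j = 0 from by omega]
      simp

theorem pv_val_eq (s : List Int) (hs : s.Pairwise (· ≤ ·)) (k i : Int) (hk : 0 ≤ k) (hi : 1 ≤ i) :
    pvValA s k i = pvValB s k i := by
  have hlen : ((pvDpAt s k i).length : Int) = k + 1 := by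
    unfold pvDpAt
    rw [pv_length_foldInner, pv_length_dp0 k hk]
    push_cast; omega
  unfold pvValA
  rw [pv_mk_any k i hk hi (pvDpAt s k i) hlen (s.length - pvCLT s i) (s.length - pvCLT s i + 1) 0 (by omega) (by omega)]
  rw [Nat.sub_zero, ← List.range_eq_range']
  unfold pvValB
  have hB : pvInnerB = pvInnerA := rfl
  rw [hB]
  rw [show (s.foldl (fun d x => pvInnerA k (min x i) d) (pvDp0 k))
      = ((s.map (fun x => min x i)).foldl (fun d w => pvInnerA k w d) (pvDp0 k)) from by rw [List.foldl_map]]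
  rw [pv_capped_decomp s hs i, List.foldl_append]
  rw [show (s.take (pvCLT s i)).foldl (fun d w => pvInnerA k w d) (pvDp0 k) = pvDpAt s k i from rfl]
  rw [pv_pyGetD_nonneg _ k hk]
  rw [pv_iter_any k i hk hi (s.length - pvCLT s i) (pvDpAt s k i) hlen]

theorem pv_foldl_app {α β : Type} (f : α → β) : ∀ (l : List α) (acc : List β),
    l.foldl (fun r x => r ++ [f x]) acc = acc ++ l.map f := by
  intro l
  induction l with
  | nil => intro acc; simp
  | cons a t ih => intro acc; simp [ih]

theorem pv_outer_inv (s : List Int) (hs : s.Pairwise (· ≤ ·)) (h0 : ∀ x ∈ s, 0 ≤ x) (k : Int) (_hk : 0 ≤ k) :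
    ∀ (m : Nat), m ≤ s.length →
      List.foldl
        (fun (st : List Bool × Nat × List Bool) i =>
          ((pvWhileA s k i st.1 st.2.1).1, (pvWhileA s k i st.1 st.2.1).2,
            if pvMkGo k i (pvWhileA s k i st.1 st.2.1).1 (s.length - (pvWhileA s k i st.1 st.2.1).2) 0
            then PySem.List.pySetD st.2.2 (i - 1) true else st.2.2))
        (PySem.List.pySetD (List.replicate (k + 1).toNat false) 0 true, 0, List.replicate s.length false)
        (PySem.List.pyRange 1 ((m : Int) + 1) 1)
      = (pvDpAt s k (m : Int), pvCLT s (m : Int),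
         (List.range s.length).map (fun t => if t < m then pvValA s k ((t : Int) + 1) else false)) := by
  intro m
  induction m with
  | zero =>
    intro _
    rw [show (((0 : Nat) : Int) + 1) = 1 from by simp, PySem.List.pyRange_one_eq_nil le_rfl, List.foldl_nil]
    have hc0 : pvCLT s ((0 : Nat) : Int) = 0 := pv_cLT_eq_zero s _ (fun y hy => by have := h0 y hy; omega)
    simp only [Prod.mk.injEq]
    refine ⟨?_, ?_, ?_⟩
    · unfold pvDpAt
      rw [hc0, List.take_zero, List.foldl_nil]
      rfl
    · rw [hc0]
    · apply List.ext_getElem (by simp)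
      intro p hp1 hp2
      simp [List.getElem_replicate]
  | succ m ih =>
    intro hm
    have hcast : ((m + 1 : Nat) : Int) = (m : Int) + 1 := by push_cast; ring
    rw [hcast, PySem.List.pyRange_one_succ_right (by omega : (1 : Int) ≤ (m : Int) + 1)]
    rw [List.foldl_append, ih (by omega), List.foldl_cons, List.foldl_nil]
    have hmono := pv_cLT_mono s ((m : Nat) : Int) ((m : Int) + 1) (by omega)
    rw [pv_while_spec s hs k ((m : Int) + 1) (pvCLT s ((m : Int) + 1)) (pvCLT s ((m : Nat) : Int)) (pvDpAt s k ((m : Nat) : Int)) hmono (by omega)]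
    have hdp : ((s.take (pvCLT s ((m : Int) + 1))).drop (pvCLT s ((m : Nat) : Int))).foldl (fun d x => pvInnerA k x d) (pvDpAt s k ((m : Nat) : Int))
        = pvDpAt s k ((m : Int) + 1) := by
      unfold pvDpAt
      have hsplit : s.take (pvCLT s ((m : Int) + 1))
          = s.take (pvCLT s ((m : Nat) : Int)) ++ (s.take (pvCLT s ((m : Int) + 1))).drop (pvCLT s ((m : Nat) : Int)) := by
        conv_lhs => rw [← List.take_append_drop (pvCLT s ((m : Nat) : Int)) (s.take (pvCLT s ((m : Int) + 1)))]
        rw [List.take_take, min_eq_left hmono]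
      conv_rhs => rw [hsplit, List.foldl_append]
    simp only [Prod.mk.injEq]
    refine ⟨hdp, by trivial, ?_⟩
    rw [hdp]
    have hval : pvMkGo k ((m : Int) + 1) (pvDpAt s k ((m : Int) + 1)) (s.length - pvCLT s ((m : Int) + 1)) 0
        = pvValA s k ((m : Int) + 1) := rfl
    rw [hval]
    rw [show ((m : Int) + 1 - 1) = ((m : Nat) : Int) from by ring]
    rw [PySem.List.pySetD_natCast]
    cases hvb : pvValA s k ((m : Int) + 1) with
    | true =>
      rw [if_pos rfl]
      apply List.ext_getElem (by simp)
      intro t h1 h2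
      rw [List.getElem_set]
      simp only [List.getElem_map, List.getElem_range]
      by_cases htm : m = t
      · subst htm
        rw [if_pos rfl, if_pos (by omega)]
        exact hvb.symm
      · rw [if_neg htm]
        by_cases h3 : t < m
        · rw [if_pos h3, if_pos (by omega)]
        · rw [if_neg h3, if_neg (by omega)]
    | false =>
      rw [if_neg (by simp)]
      apply List.ext_getElem (by simp)
      intro t h1 h2
      simp only [List.getElem_map, List.getElem_range]
      by_cases h3 : t < m
      · rw [if_pos h3, if_pos (by omega)]
      · by_cases h4 : t < m + 1
        · have ht : t = m := by omega
          subst ht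
          rw [if_neg h3, if_pos h4]
          exact hvb.symm
        · rw [if_neg h3, if_neg h4]

theorem pv_models_eq (nums : List Int) (k : Int) (hk : 0 ≤ k) (hpos : ∀ x ∈ nums, 0 ≤ x) :
    pvModelA nums k = pvModelB nums k := by
  simp only [pvModelA, pvModelB]
  have hs : (PySem.List.sorted nums (fun x => x) false).Pairwise (· ≤ ·) := by
    have h := PySem.List.sorted_pairwise (xs := nums) (key := fun x : Int => x)
    simpa using h
  have h0 : ∀ x ∈ PySem.List.sorted nums (fun x => x) false, 0 ≤ x := by
    intro x hx
    exact hpos x (by rwa [PySem.List.mem_sorted] at hx)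
  have hlen : (PySem.List.sorted nums (fun x => x) false).length = nums.length :=
    PySem.List.length_sorted _ _ _
  rw [← hlen]
  rw [pv_outer_inv (PySem.List.sorted nums (fun x => x) false) hs h0 k hk
    (PySem.List.sorted nums (fun x => x) false).length le_rfl]
  rw [pv_foldl_app, List.nil_append]
  rw [PySem.List.pyRange_one 1 (((PySem.List.sorted nums (fun x => x) false).length : Int) + 1)]
  rw [show (((PySem.List.sorted nums (fun x => x) false).length : Int) + 1 - 1).toNat
      = (PySem.List.sorted nums (fun x => x) false).length from by omega]
  rw [List.map_map]
  apply List.ext_getElem (by simp)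
  intro t h1 h2
  simp only [List.getElem_map, List.getElem_range]
  rw [if_pos (by simpa using h1)]
  show pvValA (PySem.List.sorted nums (fun x => x) false) k ((t : Int) + 1)
      = pvValB (PySem.List.sorted nums (fun x => x) false) k (1 + (t : Int))
  rw [show (1 : Int) + (t : Int) = (t : Int) + 1 from by ring]
  exact pv_val_eq (PySem.List.sorted nums (fun x => x) false) hs k ((t : Int) + 1) hk (by omega)

-- ===== bridges: each Array-based port computes its List-level twin =====
theorem pv_getI_eq (a : Array Bool) (i : Int) : pvGetI a i = a.toList.getD i.toNat false := by
  unfold pvGetI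
  by_cases h : i.toNat < a.size
  · rw [dif_pos h, List.getD_eq_getElem _ _ (by simpa using h)]
    simp
  · rw [dif_neg h, List.getD_eq_default _ _ (by simpa using h)]

theorem pv_setI_toList (a : Array Bool) (i : Int) (v : Bool) :
    (pvSetI a i v).toList = a.toList.set i.toNat v := by
  unfold pvSetI
  by_cases h : i.toNat < a.size
  · simp [Array.setIfInBounds, h]
  · simp only [Array.setIfInBounds, dif_neg h]
    rw [List.set_eq_of_length_le (by simpa using Nat.le_of_not_lt h)]

theorem pv_getI_pyGetD (a : Array Bool) (i : Int) (h : 0 ≤ i) :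
    pvGetI a i = PySem.List.pyGetD a.toList i false := by
  rw [pv_getI_eq, pv_pyGetD_nonneg _ i h]

theorem pv_setI_pySetD (a : Array Bool) (i : Int) (h : 0 ≤ i) (v : Bool) :
    (pvSetI a i v).toList = PySem.List.pySetD a.toList i v := by
  rw [pv_setI_toList, pv_pySetD_nonneg _ i h]

theorem pv_inner_bridge (k w : Int) (hw : 0 ≤ w) (a : Array Bool) :
    (pvInnerArrA k w a).toList = pvInnerA k w a.toList := by
  unfold pvInnerArrA pvInnerA
  have main : ∀ (l : List Int) (a : Array Bool), (∀ j ∈ l, w ≤ j) →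
      (l.foldl (fun d j => pvSetI d j (pvGetI d j || pvGetI d (j - w))) a).toList
      = l.foldl (fun d j => PySem.List.pySetD d j (PySem.List.pyGetD d j false || PySem.List.pyGetD d (j - w) false)) a.toList := by
    intro l
    induction l with
    | nil => intro a _; rfl
    | cons x t ih =>
      intro a hmem
      rw [List.foldl_cons, List.foldl_cons, ih _ (fun j hj => hmem j (List.mem_cons_of_mem _ hj))]
      congr 1
      have hx : w ≤ x := hmem x (List.mem_cons_self)
      have hx0 : 0 ≤ x := by omega
      rw [pv_setI_pySetD _ x hx0, pv_getI_pyGetD _ x hx0, pv_getI_pyGetD _ (x - w) (by omega)]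
  apply main
  intro j hj
  have := PySem.List.mem_pyRange_neg_one.mp hj
  omega

theorem pv_while_bridge (s : List Int) (h0 : ∀ x ∈ s, 0 ≤ x) (k i : Int) :
    ∀ (m idx : Nat) (a : Array Bool), s.length - idx ≤ m →
      (pvWhileArrA s k i a idx).1.toList = (pvWhileA s k i a.toList idx).1 ∧
      (pvWhileArrA s k i a idx).2 = (pvWhileA s k i a.toList idx).2 := by
  intro m
  induction m with
  | zero =>
    intro idx a hm
    rw [pvWhileArrA.eq_def, pvWhileA.eq_def]
    rw [dif_neg (by omega), dif_neg (by omega)]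
    exact ⟨rfl, rfl⟩
  | succ m ih =>
    intro idx a hm
    rw [pvWhileArrA.eq_def, pvWhileA.eq_def]
    by_cases h1 : idx < s.length
    · rw [dif_pos h1, dif_pos h1]
      by_cases h2 : PySem.List.pyGetD s (idx : Int) 0 < i
      · rw [if_pos h2, if_pos h2]
        have hw0 : 0 ≤ PySem.List.pyGetD s (idx : Int) 0 := by
          rw [PySem.List.pyGetD_natCast, List.getD_eq_getElem _ _ h1]
          exact h0 _ (List.getElem_mem h1)
        have hb := pv_inner_bridge k (PySem.List.pyGetD s (idx : Int) 0) hw0 a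
        have := ih (idx + 1) (pvInnerArrA k (PySem.List.pyGetD s (idx : Int) 0) a) (by omega)
        rw [hb] at this
        exact this
      · rw [if_neg h2, if_neg h2]
        exact ⟨rfl, rfl⟩
    · rw [dif_neg h1, dif_neg h1]
      exact ⟨rfl, rfl⟩

theorem pv_mk_bridge (k i : Int) (a : Array Bool) (cnt : Nat) :
    ∀ (m j : Nat), cnt + 1 - j ≤ m →
      pvMkGoArr k i a cnt j = pvMkGo k i a.toList cnt j := by
  intro m
  induction m with
  | zero =>
    intro j hm
    rw [pvMkGoArr.eq_def, pvMkGo.eq_def]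
    rw [if_neg (by omega), if_neg (by omega)]
  | succ m ih =>
    intro j hm
    rw [pvMkGoArr.eq_def, pvMkGo.eq_def]
    by_cases h1 : j < cnt + 1
    · rw [if_pos h1, if_pos h1]
      by_cases h2 : k < i * (j : Int)
      · rw [if_pos h2, if_pos h2]
      · rw [if_neg h2, if_neg h2]
        rw [pv_getI_pyGetD a (k - i * (j : Int)) (by omega)]
        by_cases h3 : PySem.List.pyGetD a.toList (k - i * (j : Int)) false = true
        · rw [if_pos h3, if_pos h3]
        · rw [if_neg h3, if_neg h3]
          exact ih (j + 1) (by omega)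
    · rw [if_neg h1, if_neg h1]

theorem pv_outerA_bridge (s : List Int) (h0 : ∀ x ∈ s, 0 ≤ x) (k : Int) :
    ∀ (l : List Int) (a : Array Bool) (idx : Nat) (res : List Bool),
      (l.foldl
        (fun (st : Array Bool × Nat × List Bool) i =>
          ((pvWhileArrA s k i st.1 st.2.1).1, (pvWhileArrA s k i st.1 st.2.1).2,
            if pvMkGoArr k i (pvWhileArrA s k i st.1 st.2.1).1 (s.length - (pvWhileArrA s k i st.1 st.2.1).2) 0
            then PySem.List.pySetD st.2.2 (i - 1) true else st.2.2)) (a, idx, res)).1.toList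
      = (l.foldl
        (fun (st : List Bool × Nat × List Bool) i =>
          ((pvWhileA s k i st.1 st.2.1).1, (pvWhileA s k i st.1 st.2.1).2,
            if pvMkGo k i (pvWhileA s k i st.1 st.2.1).1 (s.length - (pvWhileA s k i st.1 st.2.1).2) 0
            then PySem.List.pySetD st.2.2 (i - 1) true else st.2.2)) (a.toList, idx, res)).1 ∧
      (l.foldl
        (fun (st : Array Bool × Nat × List Bool) i =>
          ((pvWhileArrA s k i st.1 st.2.1).1, (pvWhileArrA s k i st.1 st.2.1).2,
            if pvMkGoArr k i (pvWhileArrA s k i st.1 st.2.1).1 (s.length - (pvWhileArrA s k i st.1 st.2.1).2) 0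
            then PySem.List.pySetD st.2.2 (i - 1) true else st.2.2)) (a, idx, res)).2
      = (l.foldl
        (fun (st : List Bool × Nat × List Bool) i =>
          ((pvWhileA s k i st.1 st.2.1).1, (pvWhileA s k i st.1 st.2.1).2,
            if pvMkGo k i (pvWhileA s k i st.1 st.2.1).1 (s.length - (pvWhileA s k i st.1 st.2.1).2) 0
            then PySem.List.pySetD st.2.2 (i - 1) true else st.2.2)) (a.toList, idx, res)).2 := by
  intro l
  induction l with
  | nil => intro a idx res; exact ⟨rfl, rfl⟩
  | cons i t ih =>
    intro a idx res
    rw [List.foldl_cons, List.foldl_cons]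
    dsimp only
    have hw := pv_while_bridge s h0 k i s.length idx a (by omega)
    have hmk : pvMkGoArr k i (pvWhileArrA s k i a idx).1 (s.length - (pvWhileArrA s k i a idx).2) 0
        = pvMkGo k i (pvWhileA s k i a.toList idx).1 (s.length - (pvWhileA s k i a.toList idx).2) 0 := by
      rw [pv_mk_bridge k i (pvWhileArrA s k i a idx).1 (s.length - (pvWhileArrA s k i a idx).2)
        (s.length - (pvWhileArrA s k i a idx).2 + 1) 0 (by omega), hw.1, hw.2]
    have hstep : ((pvWhileA s k i a.toList idx).1, (pvWhileA s k i a.toList idx).2,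
        if pvMkGo k i (pvWhileA s k i a.toList idx).1 (s.length - (pvWhileA s k i a.toList idx).2) 0
        then PySem.List.pySetD res (i - 1) true else res)
        = ((pvWhileArrA s k i a idx).1.toList, (pvWhileArrA s k i a idx).2,
        if pvMkGoArr k i (pvWhileArrA s k i a idx).1 (s.length - (pvWhileArrA s k i a idx).2) 0
        then PySem.List.pySetD res (i - 1) true else res) := by
      rw [hmk, hw.1, hw.2]
    rw [hstep]
    exact ih (pvWhileArrA s k i a idx).1 (pvWhileArrA s k i a idx).2
      (if pvMkGoArr k i (pvWhileArrA s k i a idx).1 (s.length - (pvWhileArrA s k i a idx).2) 0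
       then PySem.List.pySetD res (i - 1) true else res)

theorem pv_dp0_bridge (k : Int) :
    (pvSetI (Array.replicate (k + 1).toNat false) 0 true).toList
    = PySem.List.pySetD (List.replicate (k + 1).toNat false) 0 true := by
  rw [pv_setI_pySetD _ 0 (by omega), Array.toList_replicate]

theorem pv_bridgeA (nums : List Int) (k : Int) (hpos : ∀ x ∈ nums, 0 ≤ x) :
    subsequenceSumAfterCapping nums k = pvModelA nums k := by
  have h0 : ∀ x ∈ PySem.List.sorted nums (fun x => x) false, 0 ≤ x := by
    intro x hx
    exact hpos x (by rwa [PySem.List.mem_sorted] at hx)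
  simp only [subsequenceSumAfterCapping, pvModelA]
  rw [(pv_outerA_bridge (PySem.List.sorted nums (fun x => x) false) h0 k
    (PySem.List.pyRange 1 ((nums.length : Int) + 1) 1)
    (pvSetI (Array.replicate (k + 1).toNat false) 0 true) 0 (List.replicate nums.length false)).2,
    pv_dp0_bridge k]

theorem pv_foldInner_bridge (k i : Int) :
    ∀ (s : List Int), (∀ x ∈ s, 0 ≤ x) → 0 ≤ i → ∀ (a : Array Bool),
      (s.foldl (fun d x => pvInnerArrB k (min x i) d) a).toList
      = s.foldl (fun d x => pvInnerB k (min x i) d) a.toList := by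
  intro s
  induction s with
  | nil => intro _ _ a; rfl
  | cons x t ih =>
    intro h0 hi a
    rw [List.foldl_cons, List.foldl_cons]
    have hx : 0 ≤ x := h0 x (List.mem_cons_self)
    have hb : (pvInnerArrB k (min x i) a).toList = pvInnerB k (min x i) a.toList := by
      have h1 : pvInnerArrB = pvInnerArrA := rfl
      have h2 : pvInnerB = pvInnerA := rfl
      rw [h1, h2]
      exact pv_inner_bridge k (min x i) (by omega) a
    rw [← hb]
    exact ih (fun y hy => h0 y (List.mem_cons_of_mem _ hy)) hi _

theorem pv_outerB_bridge (s : List Int) (h0 : ∀ x ∈ s, 0 ≤ x) (k : Int) (hk : 0 ≤ k) :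
    ∀ (l : List Int), (∀ i ∈ l, 1 ≤ i) → ∀ (res : List Bool),
      l.foldl
        (fun res i => res ++ [pvGetI (s.foldl (fun d x => pvInnerArrB k (min x i) d)
          (pvSetI (Array.replicate (k + 1).toNat false) 0 true)) k]) res
      = l.foldl
        (fun res i => res ++ [PySem.List.pyGetD (s.foldl (fun d x => pvInnerB k (min x i) d)
          (PySem.List.pySetD (List.replicate (k + 1).toNat false) 0 true)) k false]) res := by
  intro l
  induction l with
  | nil => intro _ res; rfl
  | cons i t ih =>
    intro hmem res
    rw [List.foldl_cons, List.foldl_cons]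
    have hi : 1 ≤ i := hmem i (List.mem_cons_self)
    have helem : pvGetI (s.foldl (fun d x => pvInnerArrB k (min x i) d)
        (pvSetI (Array.replicate (k + 1).toNat false) 0 true)) k
        = PySem.List.pyGetD (s.foldl (fun d x => pvInnerB k (min x i) d)
        (PySem.List.pySetD (List.replicate (k + 1).toNat false) 0 true)) k false := by
      rw [pv_getI_pyGetD _ k hk]
      rw [pv_foldInner_bridge k i s h0 (by omega) (pvSetI (Array.replicate (k + 1).toNat false) 0 true)]
      rw [pv_dp0_bridge k]
    rw [helem]
    exact ih (fun y hy => hmem y (List.mem_cons_of_mem _ hy)) _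

theorem pv_bridgeB (nums : List Int) (k : Int) (hk : 0 ≤ k) (hpos : ∀ x ∈ nums, 0 ≤ x) :
    subsequenceSumAfterCapping_alt nums k = pvModelB nums k := by
  have h0 : ∀ x ∈ PySem.List.sorted nums (fun x => x) false, 0 ≤ x := by
    intro x hx
    exact hpos x (by rwa [PySem.List.mem_sorted] at hx)
  simp only [subsequenceSumAfterCapping_alt, pvModelB]
  exact pv_outerB_bridge (PySem.List.sorted nums (fun x => x) false) h0 k hk
    (PySem.List.pyRange 1 (((PySem.List.sorted nums (fun x => x) false).length : Int) + 1) 1)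
    (fun i hi => (PySem.List.mem_pyRange_one.mp hi).1) []

-- ===== VERDICT (by name: the statement is the Claim_ definition above) =====
theorem subsequenceSumAfterCapping_spec : Claim_equal_subsequenceSumAfterCapping := by
  intro nums k _hdom hpre
  obtain ⟨hk, hpos⟩ := hpre
  unfold Spec_subsequenceSumAfterCapping
  rw [pv_bridgeA nums k hpos, pv_bridgeB nums k hk hpos]
  exact pv_models_eq nums k hk hpos
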